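-- pv_equiv track=rewrite | github.com/jis8140/2023-algorithm-study | level_3/expressible_binary_tree.py | make_binary_tree
-- ===== SOURCE A (Python) =====
-- def make_max_tree_len(binary_tree_len: int) -> int:
--     tree_height = 1
--     while tree_height * 2 - 1 < binary_tree_len:
--         tree_height *= 2
--     max_tree_len = tree_height * 2 - 1
--     return max_tree_len
--
-- def make_binary_tree(number: int) -> str:
--     binary_tree = ''
--     binary_tree_len = 0
--     while number > 0:
--         div, mod = divmod(number, 2)
--         binary_tree = str(mod) + binary_tree
--         number //= 2
--         binary_tree_len += 1
--
--     max_tree_len = make_max_tree_len(binary_tree_len)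
--     return (max_tree_len - binary_tree_len) * '0' + binary_tree
-- ===== SOURCE B (Python) =====
-- def make_binary_tree(number: int) -> str:
--     bits = format(number, 'b') if number > 0 else ''
--     size = 1
--     while size < len(bits):
--         size = size * 2 + 1
--     return bits.zfill(size)
-- ===== Notes on version B (the rewrite author's own statement) =====
-- stated objective: idiomatic
-- what changed: Replaces A's digit-by-digit divmod string-building loop and the doubling tree-height helper with a single library binary conversion (format(n,'b')), a size = size*2+1 loop for the full-tree length, and zfill for the padding.
import Mathlib
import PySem

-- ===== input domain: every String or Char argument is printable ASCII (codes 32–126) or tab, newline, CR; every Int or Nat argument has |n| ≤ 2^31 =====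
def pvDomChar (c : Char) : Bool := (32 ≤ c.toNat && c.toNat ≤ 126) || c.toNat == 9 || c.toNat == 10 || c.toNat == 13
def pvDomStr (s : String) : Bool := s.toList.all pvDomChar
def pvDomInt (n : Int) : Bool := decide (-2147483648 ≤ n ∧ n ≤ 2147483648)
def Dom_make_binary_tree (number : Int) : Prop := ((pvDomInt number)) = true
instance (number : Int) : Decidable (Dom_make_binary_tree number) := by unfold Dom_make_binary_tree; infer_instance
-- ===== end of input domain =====

-- B replaces A's divmod string-building loop with one library binary conversion plus zfill (idiomatic, not faster).

-- ===== PORT A =====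
-- while tree_height * 2 - 1 < binary_tree_len: tree_height *= 2   (tree_height stays positive, carried as a hypothesis for termination)
def mmtlGo (L : Int) (h : Int) (hp : 0 < h) : Int :=
  if h * 2 - 1 < L then mmtlGo L (h * 2) (by omega) else h * 2 - 1
termination_by (L - h).toNat
decreasing_by omega

def make_max_tree_len (binary_tree_len : Int) : Int :=
  mmtlGo binary_tree_len 1 one_pos

-- the while-number>0 loop of make_binary_tree; the string is carried as its List Char
def mbtLoop (number : Int) (binary_tree : List Char) (binary_tree_len : Int) : List Char × Int :=
  if h : 0 < number then
    mbtLoop (PySem.Int.floordiv number 2)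
      (PySem.Int.toChars (PySem.Int.mod number 2) ++ binary_tree) (binary_tree_len + 1)
  else (binary_tree, binary_tree_len)
termination_by number.toNat
decreasing_by
  have := PySem.Int.floordiv_eq_ediv_of_pos (a := number) (b := 2) (by omega)
  omega

def make_binary_tree (number : Int) : String :=
  let r := mbtLoop number [] 0
  let max_tree_len := make_max_tree_len r.2
  String.ofList (List.replicate (max_tree_len - r.2).toNat '0' ++ r.1)

-- ===== PORT B =====
-- while size < len(bits): size = size * 2 + 1   (lengths are nonnegative, carried as Nat)
def sizeUp (len : Nat) (size : Nat) : Nat :=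
  if size < len then sizeUp len (size * 2 + 1) else size
termination_by len - size
decreasing_by omega

def make_binary_tree_alt (number : Int) : String :=
  let bits : String := if 0 < number then PySem.Int.toBin number else ""
  let size : Nat := sizeUp bits.toList.length 1
  PySem.Str.zfill bits (size : Int)

-- ===== PRECONDITION & SPEC =====
def Spec_make_binary_tree (number : Int) (out : String) : Prop := out = make_binary_tree_alt number
instance (number : Int) (out : String) : Decidable (Spec_make_binary_tree number out) := by unfold Spec_make_binary_tree; infer_instance

-- ===== CLAIM (what is proved, stated in full; the proofs are below) =====
def Claim_equal_make_binary_tree : Prop := ∀ (number : Int), Dom_make_binary_tree number → Spec_make_binary_tree number (make_binary_tree number)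

-- ===== LEMMAS AND PROOFS =====

-- proof-side canonical form of the binary digits
def bitsOf (n : Nat) : List Char :=
  if n = 0 then [] else bitsOf (n / 2) ++ [(n % 2).digitChar]

lemma toDigitsCore_eq_bitsOf : ∀ (fuel n : Nat) (ds : List Char), 0 < n → n ≤ fuel →
    Nat.toDigitsCore 2 fuel n ds = bitsOf n ++ ds := by
  intro fuel
  induction fuel with
  | zero => intro n ds h1 h2; omega
  | succ f ih =>
    intro n ds h1 h2
    rw [Nat.toDigitsCore]
    by_cases hz : n / 2 = 0
    · rw [if_pos hz, bitsOf, if_neg (by omega), hz, bitsOf, if_pos rfl]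
      simp
    · rw [if_neg hz, ih (n / 2) _ (by omega) (by omega),
        show bitsOf n = bitsOf (n / 2) ++ [(n % 2).digitChar] by rw [bitsOf, if_neg (by omega)]]
      simp

lemma toDigits_eq_bitsOf (n : Nat) (h : 0 < n) : Nat.toDigits 2 n = bitsOf n := by
  rw [Nat.toDigits, toDigitsCore_eq_bitsOf (n + 1) n [] h (by omega)]
  simp

lemma mbtLoop_eq (n : Int) (acc : List Char) (len : Int) :
    mbtLoop n acc len = (bitsOf n.toNat ++ acc, len + (bitsOf n.toNat).length) := by
  induction n, acc, len using mbtLoop.induct with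
  | case1 n acc len hpos ih =>
    rw [mbtLoop, dif_pos hpos, ih]
    have hfd : PySem.Int.floordiv n 2 = n / 2 :=
      PySem.Int.floordiv_eq_ediv_of_pos (by omega)
    have hmd : PySem.Int.mod n 2 = n % 2 :=
      PySem.Int.mod_eq_emod_of_pos (by omega)
    have htn : (n / 2).toNat = n.toNat / 2 := by omega
    have hbits : bitsOf n.toNat = bitsOf (n.toNat / 2) ++ [(n.toNat % 2).digitChar] := by
      rw [bitsOf, if_neg (by omega)]
    have hchar : PySem.Int.toChars (PySem.Int.mod n 2) = [(n.toNat % 2).digitChar] := by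
      rw [hmd]
      rcases Int.emod_two_eq_zero_or_one n with h0 | h1
      · rw [h0]; have h2 : n.toNat % 2 = 0 := by omega
        rw [h2]; decide
      · rw [h1]; have h2 : n.toNat % 2 = 1 := by omega
        rw [h2]; decide
    rw [hfd, htn, hchar, hbits]
    simp only [List.append_assoc, List.singleton_append, List.length_append,
      List.length_singleton]
    simp only [Prod.mk.injEq]
    refine ⟨by trivial, by push_cast; ring⟩
  | case2 n acc len hpos =>
    rw [mbtLoop, dif_neg hpos]
    have h0 : n.toNat = 0 := by omega
    rw [h0, bitsOf, if_pos rfl]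
    simp

lemma mmtlGo_eq_sizeUp (L : Int) : ∀ (h : Int) (hp : 0 < h), 0 ≤ L →
    mmtlGo L h hp = ((sizeUp L.toNat (h * 2 - 1).toNat : Nat) : Int) := by
  intro h hp
  induction h, hp using mmtlGo.induct (L := L) with
  | case1 h hp hlt ih =>
    intro hL
    rw [mmtlGo, if_pos hlt, ih hL]
    have hstep : sizeUp L.toNat (h * 2 - 1).toNat = sizeUp L.toNat (h * 2 * 2 - 1).toNat := by
      conv_lhs => rw [sizeUp]
      rw [if_pos (by omega)]
      congr 1
      omega
    rw [hstep]
  | case2 h hp hlt =>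
    intro hL
    rw [mmtlGo, if_neg hlt]
    conv_rhs => rw [sizeUp]
    rw [if_neg (by omega)]
    omega

lemma bitsB_toList (number : Int) :
    (if 0 < number then PySem.Int.toBin number else "").toList = bitsOf number.toNat := by
  by_cases h : 0 < number
  · rw [if_pos h, PySem.Int.toList_toBin, PySem.Int.toBinChars, if_neg (by omega),
      toDigits_eq_bitsOf _ (by omega)]
  · rw [if_neg h]
    have h0 : number.toNat = 0 := by omega
    rw [h0, bitsOf, if_pos rfl]
    rfl

lemma bitsOf_no_sign : ∀ (n : Nat) (c : Char) (rest : List Char), bitsOf n = c :: rest →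
    ¬ (c = '+' ∨ c = '-') := by
  intro n
  induction n using Nat.strong_induction_on with
  | _ n ih =>
    intro c rest h
    by_cases hz : n = 0
    · rw [hz, bitsOf, if_pos rfl] at h; simp at h
    · rw [bitsOf, if_neg hz] at h
      by_cases hz2 : n / 2 = 0
      · rw [hz2, bitsOf, if_pos rfl] at h
        simp at h
        obtain ⟨hc, -⟩ := h
        have h2 : n % 2 = 0 ∨ n % 2 = 1 := by omega
        rcases h2 with h2 | h2 <;> rw [h2] at hc <;> subst hc <;> decide
      · rcases hd : bitsOf (n / 2) with _ | ⟨c', rest'⟩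
        · rw [bitsOf, if_neg hz2] at hd; simp at hd
        · rw [hd] at h
          simp at h
          obtain ⟨hc, -⟩ := h
          subst hc
          exact ih (n / 2) (by omega) c' rest' hd

lemma sizeUp_ge_len (len : Nat) : ∀ (s : Nat), len ≤ sizeUp len s := by
  intro s
  induction s using sizeUp.induct (len := len) with
  | case1 s hlt ih => rw [sizeUp, if_pos hlt]; exact ih
  | case2 s hlt => rw [sizeUp, if_neg hlt]; omega

lemma mmtl_eq (len : Nat) : make_max_tree_len (len : Int) = ((sizeUp len 1 : Nat) : Int) := by
  rw [make_max_tree_len, mmtlGo_eq_sizeUp _ _ one_pos (by positivity)]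
  norm_num

lemma zfill_no_sign (bits : List Char)
    (hns : ∀ c rest, bits = c :: rest → ¬ (c = '+' ∨ c = '-')) (w : Int) :
    PySem.Chars.zfill bits w = List.replicate (w.toNat - bits.length) '0' ++ bits := by
  rw [PySem.Chars.zfill.eq_def]
  by_cases hle : w ≤ (bits.length : Int)
  · rw [if_pos hle]
    have h0 : w.toNat - bits.length = 0 := by omega
    rw [h0]
    simp
  · rw [if_neg hle]
    rcases hb : bits with _ | ⟨c, rest⟩
    · simp
    · dsimp only
      rw [if_neg (hns c rest hb)]

-- ===== VERDICT (by name: the statement is the Claim_ definition above) =====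
theorem make_binary_tree_spec : Claim_equal_make_binary_tree := by
  intro number _
  unfold Spec_make_binary_tree make_binary_tree make_binary_tree_alt
  rw [mbtLoop_eq]
  simp only [List.append_nil, Int.zero_add]
  rw [← String.toList_inj, PySem.Str.toList_zfill, bitsB_toList number, String.toList_ofList,
    mmtl_eq, zfill_no_sign _ (fun c rest hb => bitsOf_no_sign number.toNat c rest hb)]
  have hge := sizeUp_ge_len (bitsOf number.toNat).length 1
  congr 1
  congr 1
  omega
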